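-- pv_equiv track=rewrite | github.com/LuisDiaz-ipsilon/Investigacion-Operaciones | kruskal.py | remove_class
-- ===== SOURCE A (Python) =====
-- def remove_class(class_x, vert):
--     if not vert:
--         return []
--     else:
--         head = vert.pop(0)
--         if set(head) == set(class_x):
--             return vert
--         else:
--             return [head] + (remove_class(class_x, vert))
-- ===== SOURCE B (Python) =====
-- def remove_class(class_x, vert):
--     target = set(class_x)
--     result = []
--     while vert:
--         head = vert.pop(0)
--         if set(head) == target:
--             return result + vert
--         result.append(head)
--     return result
-- ===== Notes on version B (the rewrite author's own statement) =====
-- stated objective: simpler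
-- what changed: Recursion replaced by an explicit iterative loop with an accumulator; set(class_x) is computed once instead of at every recursive step.
import Mathlib
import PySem

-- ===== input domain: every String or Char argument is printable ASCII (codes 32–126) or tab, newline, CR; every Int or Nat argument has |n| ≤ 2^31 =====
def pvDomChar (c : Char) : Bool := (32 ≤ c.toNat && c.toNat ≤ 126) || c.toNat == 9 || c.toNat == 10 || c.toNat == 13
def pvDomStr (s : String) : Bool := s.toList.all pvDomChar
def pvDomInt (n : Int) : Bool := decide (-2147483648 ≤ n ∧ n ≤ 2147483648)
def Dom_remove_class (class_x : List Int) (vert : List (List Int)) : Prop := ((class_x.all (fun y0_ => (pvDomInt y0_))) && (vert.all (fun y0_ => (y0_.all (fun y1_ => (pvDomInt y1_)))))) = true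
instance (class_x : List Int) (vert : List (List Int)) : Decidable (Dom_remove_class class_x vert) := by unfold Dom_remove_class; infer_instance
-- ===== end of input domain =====

-- ===== PORT A =====
-- Literal port of A: recursion with pop(0); return-value equivalence only
-- (both Pythons pop the front of `vert` up to and including the match).
def remove_class (class_x : List Int) (vert : List (List Int)) : List (List Int) :=
  match vert with
  | [] => []
  | head :: rest =>
      if PySem.Set.equal (PySem.Set.ofList head) (PySem.Set.ofList class_x) then rest
      else [head] ++ remove_class class_x rest

-- ===== PORT B =====
-- B: iterative loop with accumulator `result`; target set computed once.
def removeClassLoop (target : PySem.Set Int) (result : List (List Int)) (vert : List (List Int)) : List (List Int) :=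
  match vert with
  | [] => result
  | head :: rest =>
      if PySem.Set.equal (PySem.Set.ofList head) target then result ++ rest
      else removeClassLoop target (result ++ [head]) rest

def remove_class_alt (class_x : List Int) (vert : List (List Int)) : List (List Int) :=
  removeClassLoop (PySem.Set.ofList class_x) [] vert

-- ===== PRECONDITION & SPEC =====
def Spec_remove_class (class_x : List Int) (vert : List (List Int)) (out : List (List Int)) : Prop := out = remove_class_alt class_x vert
instance (class_x : List Int) (vert : List (List Int)) (out : List (List Int)) : Decidable (Spec_remove_class class_x vert out) := by unfold Spec_remove_class; infer_instance

-- ===== CLAIM (what is proved, stated in full; the proofs are below) =====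
def Claim_equal_remove_class : Prop := ∀ (class_x : List Int) (vert : List (List Int)), Dom_remove_class class_x vert → Spec_remove_class class_x vert (remove_class class_x vert)

-- ===== LEMMAS AND PROOFS =====
theorem removeClassLoop_eq (class_x : List Int) (vert : List (List Int)) :
    ∀ result, removeClassLoop (PySem.Set.ofList class_x) result vert = result ++ remove_class class_x vert := by
  induction vert with
  | nil => intro result; simp [removeClassLoop, remove_class]
  | cons head rest ih =>
      intro result
      simp only [removeClassLoop, remove_class]
      split
      · rfl
      · rw [ih]; simp

-- ===== VERDICT (by name: the statement is the Claim_ definition above) =====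
theorem remove_class_spec : Claim_equal_remove_class := by
  intro class_x vert _
  unfold Spec_remove_class remove_class_alt
  rw [removeClassLoop_eq]
  simp
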